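-- pv_equiv track=rewrite | github.com/Shaevitzaiden/CS513 | hw2/hw2_perceptron.py | make_binary_mapping
-- ===== SOURCE A (Python) =====
-- def make_binary_mapping(data):
--     # create binarization mapping where "new_data" is lists of integers corresponding to hot indices in the binarized matrix
--     mapping = {}
--     new_data = []
--     for row in data:
--         new_row = []
--         for j, x in enumerate(row[:-1]):
--             feature = (j, x) # j is the column index and x is the value
--             if feature not in mapping: # new feature
--                 mapping[feature] = len(mapping) # insert a new feature into the index
--             new_row.append(mapping[feature])
--
--     return mapping
-- ===== SOURCE B (Python) =====
-- def make_binary_mapping(data):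
--     # Different strategy: no incremental "len(mapping)" numbering. Scan the
--     # feature stream BACKWARDS, overwriting, so each feature ends up holding its
--     # earliest stream position; sorting the features by that position recovers
--     # first-appearance order, and enumerating the sorted list assigns indices.
--     stream = [(j, x) for row in data for j, x in enumerate(row[:-1])]
--     first = {}
--     for p in range(len(stream) - 1, -1, -1):
--         first[stream[p]] = p
--     return {f: i for i, f in enumerate(sorted(first, key=first.get))}
-- ===== Notes on version B (the rewrite author's own statement) =====
-- stated objective: alternative
-- what changed: Replaces A's single incremental pass (membership test + len(mapping) numbering inside nested loops, dead new_data/new_row locals) by a reverse-overwrite-then-sort algorithm: scan the feature stream backwards so a dict retains each feature's earliest position, then sort features by that position and enumerate to assign indices.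
import Mathlib
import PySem

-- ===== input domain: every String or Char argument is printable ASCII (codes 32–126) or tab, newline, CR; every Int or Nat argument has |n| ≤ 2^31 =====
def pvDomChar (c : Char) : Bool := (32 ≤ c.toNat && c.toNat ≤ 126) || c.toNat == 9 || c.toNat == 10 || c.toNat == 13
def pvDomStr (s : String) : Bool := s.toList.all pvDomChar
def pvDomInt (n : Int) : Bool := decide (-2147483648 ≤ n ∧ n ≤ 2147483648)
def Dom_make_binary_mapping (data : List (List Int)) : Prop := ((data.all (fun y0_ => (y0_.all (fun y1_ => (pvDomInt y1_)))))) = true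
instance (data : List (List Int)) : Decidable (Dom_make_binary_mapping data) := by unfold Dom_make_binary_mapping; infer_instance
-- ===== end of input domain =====

-- B replaces A's incremental numbering by a reverse-overwrite-then-sort algorithm;
-- return value only is compared (A's new_data/new_row are dead locals).

-- ===== PORT A =====
-- the body of A's inner loop: insert a fresh feature numbered len(mapping)
def mbmStep (m : PySem.Dict (Int × Int) Int) (feature : Int × Int) : PySem.Dict (Int × Int) Int :=
  if m.contains feature then m else m.insert feature (PySem.Dict.size m)

def make_binary_mapping (data : List (List Int)) : List (Int × Int × Int) :=
  (data.foldl (fun m row =>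
      (PySem.List.enumerate (PySem.List.slice row none (some (-1))) 0).foldl mbmStep m)
      PySem.Dict.empty).items.map (fun p => (p.1.1, p.1.2, p.2))

-- ===== PORT B =====
def make_binary_mapping_alt (data : List (List Int)) : List (Int × Int × Int) :=
  -- stream = [(j, x) for row in data for j, x in enumerate(row[:-1])]
  let stream := data.flatMap (fun row => PySem.List.enumerate (PySem.List.slice row none (some (-1))) 0)
  -- for p in range(len(stream)-1, -1, -1): first[stream[p]] = p
  let first := (PySem.List.pyRange ((stream.length : Int) - 1) (-1) (-1)).foldl
      (fun d p => d.insert (PySem.List.pyGetD stream p (0, 0)) p) PySem.Dict.empty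
  -- {f: i for i, f in enumerate(sorted(first, key=first.get))}  (every key is present, so first.get = getD _ 0)
  (PySem.List.enumerate (PySem.List.sorted first.keys (fun f => first.getD f 0) false) 0).map
      (fun p => (p.2.1, p.2.2, p.1))

-- ===== PRECONDITION & SPEC =====
def Spec_make_binary_mapping (data : List (List Int)) (out : List (Int × Int × Int)) : Prop := out = make_binary_mapping_alt data
instance (data : List (List Int)) (out : List (Int × Int × Int)) : Decidable (Spec_make_binary_mapping data out) := by unfold Spec_make_binary_mapping; infer_instance

-- ===== CLAIM (what is proved, stated in full; the proofs are below) =====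
def Claim_equal_make_binary_mapping : Prop := ∀ (data : List (List Int)), Dom_make_binary_mapping data → Spec_make_binary_mapping data (make_binary_mapping data)

-- ===== LEMMAS AND PROOFS =====

-- A's nested loop over rows is the single loop over the flattened feature list
lemma foldl_flatMap' {α β γ : Type} (l : List α) (f : α → List β) (g : γ → β → γ) (init : γ) :
    (l.flatMap f).foldl g init = l.foldl (fun c a => (f a).foldl g c) init := by
  induction l generalizing init with
  | nil => rfl
  | cons a t ih => simp [List.flatMap_cons, List.foldl_append, ih]

-- appending one feature to the stream extends its ordered dedup iff it is new
lemma dedup_append_singleton (ks : List (Int × Int)) (k : Int × Int) :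
    PySem.List.dedup (ks ++ [k])
      = if k ∈ ks then PySem.List.dedup ks else PySem.List.dedup ks ++ [k] := by
  simp only [PySem.List.dedup_eq_ofList]
  rw [PySem.Set.ofList_eq_foldl, List.foldl_append, ← PySem.Set.ofList_eq_foldl]
  simp only [List.foldl_cons, List.foldl_nil, PySem.Set.add]
  by_cases h : k ∈ ks <;> simp [h]

-- invariant of A's loop: the dict's items are the enumerated ordered dedup of the seen features
lemma mbm_fold_items (ks : List (Int × Int)) :
    (ks.foldl mbmStep PySem.Dict.empty).items
      = (PySem.List.enumerate (PySem.List.dedup ks) 0).map (fun p => (p.2, p.1)) := by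
  induction ks using List.reverseRecOn with
  | nil => rfl
  | append_singleton ks k ih =>
    have hkeys : (ks.foldl mbmStep PySem.Dict.empty).keys = PySem.List.dedup ks := by
      show ((ks.foldl mbmStep PySem.Dict.empty).items).map (·.1) = _
      rw [ih, List.map_map]
      simp [Function.comp_def]
    have hcont : (ks.foldl mbmStep PySem.Dict.empty).contains k = decide (k ∈ ks) := by
      rw [PySem.Dict.contains_eq_decide_mem_keys, hkeys]
      simp [PySem.Set.mem_ofList]
    have hdedup := dedup_append_singleton ks k
    rw [List.foldl_append, List.foldl_cons, List.foldl_nil, mbmStep, hcont, hdedup]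
    by_cases hk : k ∈ ks
    · simp [hk, ih]
    · have hnc : (ks.foldl mbmStep PySem.Dict.empty).contains k = false := by
        rw [hcont]; simp [hk]
      simp only [hk, decide_false, Bool.false_eq_true, if_false]
      rw [PySem.Dict.items_insert_of_not_contains _ _ hnc]
      have hsize : ((ks.foldl mbmStep PySem.Dict.empty).size : Int)
          = ((PySem.List.dedup ks).length : Int) := by
        have h1 : (ks.foldl mbmStep PySem.Dict.empty).size
            = ((ks.foldl mbmStep PySem.Dict.empty).items).length := rfl
        rw [h1, ih]
        simp [PySem.List.length_enumerate]
      rw [ih, hsize, PySem.List.enumerate_append]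
      simp

-- B's reverse-position dict, folded over the reversed enumeration of the stream
def revBuild (ks : List (Int × Int)) (s : Int) : PySem.Dict (Int × Int) Int :=
  ((PySem.List.enumerate ks s).reverse).foldl (fun d p => d.insert p.2 p.1) PySem.Dict.empty

lemma revBuild_cons (k : Int × Int) (t : List (Int × Int)) (s : Int) :
    revBuild (k :: t) s = (revBuild t (s + 1)).insert k s := by
  simp [revBuild, PySem.List.enumerate_cons, List.foldl_append]

-- value stored for a member: its first-occurrence index, offset by s
lemma revBuild_getD (ks : List (Int × Int)) (s : Int) (f : Int × Int) (hf : f ∈ ks) :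
    (revBuild ks s).getD f 0 = s + (ks.idxOf f : Int) := by
  induction ks generalizing s with
  | nil => cases hf
  | cons k t ih =>
    rw [revBuild_cons]
    by_cases h : f = k
    · subst h; simp [PySem.Dict.getD_insert_self, List.idxOf_cons_self]
    · have hm : f ∈ t := by cases hf with | head => exact absurd rfl h | tail _ h' => exact h'
      rw [PySem.Dict.getD_insert_of_ne _ _ _ h, ih (s + 1) hm]
      have : (k :: t).idxOf f = t.idxOf f + 1 :=
        List.idxOf_cons_ne t (fun e => h e.symm)
      rw [this]; push_cast; ring

lemma revBuild_keys (ks : List (Int × Int)) (s : Int) :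
    (revBuild ks s).keys = PySem.Set.ofList ks.reverse := by
  unfold revBuild
  refine (PySem.Dict.keys_foldl_insert_key ((PySem.List.enumerate ks s).reverse)
      (·.2) (fun _ p => p.1) PySem.Dict.empty).trans ?_
  rw [PySem.Dict.keys_empty]
  have : ((PySem.List.enumerate ks s).reverse).map (·.2) = ks.reverse := by
    rw [List.map_reverse, PySem.List.map_snd_enumerate]
  rw [this]
  exact PySem.Set.update_empty ks.reverse

-- the ordered dedup is strictly increasing in first-occurrence index
lemma dedup_pairwise_idxOf (ks : List (Int × Int)) :
    (PySem.List.dedup ks).Pairwise (fun a b => ks.idxOf a < ks.idxOf b) := by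
  induction ks using List.reverseRecOn with
  | nil => simp [PySem.List.dedup]
  | append_singleton ks k ih =>
    rw [dedup_append_singleton]
    by_cases hk : k ∈ ks
    · simp only [hk, if_true]
      refine ih.imp_of_mem ?_
      intro a b ha hb hab
      have ha' : a ∈ ks := (PySem.List.mem_dedup ks a).1 ha
      have hb' : b ∈ ks := (PySem.List.mem_dedup ks b).1 hb
      rwa [List.idxOf_append_of_mem ha', List.idxOf_append_of_mem hb']
    · simp only [hk, if_false]
      rw [List.pairwise_append]
      refine ⟨?_, List.pairwise_singleton _ _, ?_⟩
      · refine ih.imp_of_mem ?_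
        intro a b ha hb hab
        have ha' : a ∈ ks := (PySem.List.mem_dedup ks a).1 ha
        have hb' : b ∈ ks := (PySem.List.mem_dedup ks b).1 hb
        rwa [List.idxOf_append_of_mem ha', List.idxOf_append_of_mem hb']
      · intro a ha b hb
        rw [List.mem_singleton] at hb; subst hb
        have ha' : a ∈ ks := (PySem.List.mem_dedup ks a).1 ha
        rw [List.idxOf_append_of_mem ha', List.idxOf_append_of_notMem hk,
            List.idxOf_cons_self, Nat.add_zero]
        exact List.idxOf_lt_length_of_mem ha'

-- B's sort by stored first position recovers the ordered dedup of the stream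
lemma sorted_revBuild_keys (ks : List (Int × Int)) :
    PySem.List.sorted (revBuild ks 0).keys (fun f => (revBuild ks 0).getD f 0) false
      = PySem.List.dedup ks := by
  apply PySem.List.sorted_eq_of_perm_of_pairwise_lt
  · rw [revBuild_keys]
    apply (List.perm_ext_iff_of_nodup (PySem.List.nodup_dedup ks) (PySem.Set.nodup_ofList _)).mpr
    intro x
    rw [PySem.List.mem_dedup, PySem.Set.mem_ofList, List.mem_reverse]
  · refine (dedup_pairwise_idxOf ks).imp_of_mem ?_
    intro a b ha hb hab
    have ha' : a ∈ ks := (PySem.List.mem_dedup ks a).1 ha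
    have hb' : b ∈ ks := (PySem.List.mem_dedup ks b).1 hb
    rw [revBuild_getD ks 0 a ha', revBuild_getD ks 0 b hb']
    simpa using hab

-- B's pyRange countdown fold IS revBuild of the stream
lemma pyRange_fold_eq_revBuild (ks : List (Int × Int)) :
    (PySem.List.pyRange ((ks.length : Int) - 1) (-1) (-1)).foldl
        (fun d p => d.insert (PySem.List.pyGetD ks p (0, 0)) p) PySem.Dict.empty
      = revBuild ks 0 := by
  unfold revBuild
  rw [PySem.List.pyRange_neg_one_eq_reverse]
  have h1 : ((-1 : Int) + 1) = 0 := by ring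
  have h2 : ((ks.length : Int) - 1 + 1) = (ks.length : Int) := by ring
  rw [h1, h2]
  have henum : PySem.List.enumerate ks 0
      = (PySem.List.pyRange 0 (ks.length : Int) 1).map (fun j => (j, PySem.List.pyGetD ks j (0, 0))) := by
    have := PySem.List.enumerate_eq_map_pyRange ks (0, 0)
    simpa [PySem.List.len_eq] using this
  rw [henum, List.map_reverse.symm, List.foldl_map]

-- ===== VERDICT (by name: the statement is the Claim_ definition above) =====
theorem make_binary_mapping_spec : Claim_equal_make_binary_mapping := by
  intro data _
  show make_binary_mapping data = make_binary_mapping_alt data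
  unfold make_binary_mapping make_binary_mapping_alt
  rw [← foldl_flatMap', mbm_fold_items, List.map_map]
  simp only [pyRange_fold_eq_revBuild, sorted_revBuild_keys]
  simp [Function.comp_def]
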